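-- pv_equiv track=rewrite | github.com/diplat-dev/BuildTools | WynnBuilder/build_tester.py | _pareto_reduce_skill_requirements
-- ===== SOURCE A (Python) =====
-- def _pareto_reduce_skill_requirements(
--     candidates: list[tuple[int, int, int, int, int]],
-- ) -> list[tuple[int, int, int, int, int]]:
--     if not candidates:
--         return [(0, 0, 0, 0, 0)]
--
--     minima: list[tuple[int, int, int, int, int]] = []
--     for candidate in sorted(candidates, key=lambda values: (sum(values), values)):
--         dominated = False
--         kept: list[tuple[int, int, int, int, int]] = []
--         for existing in minima:
--             if all(existing[index] <= candidate[index] for index in range(5)):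
--                 dominated = True
--                 break
--             if all(candidate[index] <= existing[index] for index in range(5)):
--                 continue
--             kept.append(existing)
--         if not dominated:
--             kept.append(candidate)
--             minima = kept
--     return minima
-- ===== SOURCE B (Python) =====
-- def _pareto_reduce_skill_requirements(
--     candidates: list[tuple[int, int, int, int, int]],
-- ) -> list[tuple[int, int, int, int, int]]:
--     if not candidates:
--         return [(0, 0, 0, 0, 0)]
--     points = set(candidates)
--     kept = [
--         p
--         for p in points
--         if not any(q != p and all(q[i] <= p[i] for i in range(5)) for q in points)
--     ]
--     return sorted(kept, key=lambda values: (sum(values), values))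
-- ===== Notes on version B (the rewrite author's own statement) =====
-- stated objective: simpler
-- what changed: B replaces A's incremental frontier loop (sort, then fold maintaining a pruned minima list with dominated/kept bookkeeping) by a stateless definition: deduplicate to a set, keep exactly the points no distinct point dominates, and sort the survivors by (sum, tuple).
import Mathlib
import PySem

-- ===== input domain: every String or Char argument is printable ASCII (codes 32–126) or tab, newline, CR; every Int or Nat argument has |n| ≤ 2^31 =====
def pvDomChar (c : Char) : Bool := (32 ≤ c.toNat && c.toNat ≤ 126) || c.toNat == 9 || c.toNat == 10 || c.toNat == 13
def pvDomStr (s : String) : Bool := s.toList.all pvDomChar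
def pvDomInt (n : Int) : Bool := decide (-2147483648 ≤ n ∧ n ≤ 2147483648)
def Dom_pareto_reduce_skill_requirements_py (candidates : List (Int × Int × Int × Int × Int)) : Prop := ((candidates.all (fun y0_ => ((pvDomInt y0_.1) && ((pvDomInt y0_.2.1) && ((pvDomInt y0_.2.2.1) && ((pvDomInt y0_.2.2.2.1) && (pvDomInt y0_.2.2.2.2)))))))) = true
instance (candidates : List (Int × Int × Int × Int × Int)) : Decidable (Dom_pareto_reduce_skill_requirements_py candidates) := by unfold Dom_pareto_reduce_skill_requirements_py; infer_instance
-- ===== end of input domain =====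

-- B replaces A's incremental sorted-frontier pruning loop by a stateless definition (keep the
-- distinct points no distinct point dominates, sorted by (sum, tuple)); same O(n^2) cost.

-- shared arithmetic helpers (both Pythons compare componentwise and key by (sum(values), values))
def pvSum (v : Int × Int × Int × Int × Int) : Int :=
  v.1 + v.2.1 + v.2.2.1 + v.2.2.2.1 + v.2.2.2.2

-- Python key (sum(values), values): ported as the flat 6-list, whose lexicographic order is the same
def pvKey (v : Int × Int × Int × Int × Int) : List Int :=
  [pvSum v, v.1, v.2.1, v.2.2.1, v.2.2.2.1, v.2.2.2.2]

-- all(q[index] <= p[index] for index in range(5)), range(5) unrolled over the tuple components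
def pvLe (q p : Int × Int × Int × Int × Int) : Bool :=
  decide (q.1 ≤ p.1) && decide (q.2.1 ≤ p.2.1) && decide (q.2.2.1 ≤ p.2.2.1) &&
    decide (q.2.2.2.1 ≤ p.2.2.2.1) && decide (q.2.2.2.2 ≤ p.2.2.2.2)

-- sorted(xs, key=lambda values: (sum(values), values)): Python's tuple order is the lexicographic
-- order on the flat key list; the LinearOrder instance on List Int is passed explicitly
def pvSorted (xs : List (Int × Int × Int × Int × Int)) : List (Int × Int × Int × Int × Int) :=
  @PySem.List.sorted _ (List Int) List.instLinearOrder.toLT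
    (@LinearOrder.toDecidableLT _ List.instLinearOrder) xs pvKey false

-- ===== PORT A =====
-- A's inner 'for existing in minima' loop: none = dominated (break), some kept = surviving list
def pvInnerA (c : Int × Int × Int × Int × Int) :
    List (Int × Int × Int × Int × Int) → Option (List (Int × Int × Int × Int × Int))
  | [] => some []
  | e :: rest =>
    if pvLe e c then none
    else if pvLe c e then pvInnerA c rest
    else (pvInnerA c rest).map (fun k => e :: k)

-- one iteration of A's outer loop (minima updated only when not dominated)
def pvStepA (minima : List (Int × Int × Int × Int × Int)) (c : Int × Int × Int × Int × Int) :
    List (Int × Int × Int × Int × Int) :=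
  match pvInnerA c minima with
  | none => minima
  | some kept => kept ++ [c]

def pareto_reduce_skill_requirements_py (candidates : List (Int × Int × Int × Int × Int)) :
    List (Int × Int × Int × Int × Int) :=
  if candidates = [] then [(0, 0, 0, 0, 0)]
  else (pvSorted candidates).foldl pvStepA []

-- ===== PORT B =====
def pareto_reduce_skill_requirements_py_alt (candidates : List (Int × Int × Int × Int × Int)) :
    List (Int × Int × Int × Int × Int) :=
  if candidates = [] then [(0, 0, 0, 0, 0)]
  else
    let points : PySem.Set (Int × Int × Int × Int × Int) := PySem.Set.ofList candidates
    let kept := points.filter (fun p => ! points.any (fun q => (!(q == p)) && pvLe q p))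
    pvSorted kept

-- ===== PRECONDITION & SPEC =====
def Spec_pareto_reduce_skill_requirements_py (candidates : List (Int × Int × Int × Int × Int)) (out : List (Int × Int × Int × Int × Int)) : Prop := out = pareto_reduce_skill_requirements_py_alt candidates
instance (candidates : List (Int × Int × Int × Int × Int)) (out : List (Int × Int × Int × Int × Int)) : Decidable (Spec_pareto_reduce_skill_requirements_py candidates out) := by unfold Spec_pareto_reduce_skill_requirements_py; infer_instance

-- ===== CLAIM (what is proved, stated in full; the proofs are below) =====
def Claim_equal_pareto_reduce_skill_requirements_py : Prop := ∀ (candidates : List (Int × Int × Int × Int × Int)), Dom_pareto_reduce_skill_requirements_py candidates → Spec_pareto_reduce_skill_requirements_py candidates (pareto_reduce_skill_requirements_py candidates)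

-- ===== LEMMAS AND PROOFS =====

-- p is Pareto-minimal among the points of l (B's filter predicate, over an arbitrary list)
def pvMinIn (l : List (Int × Int × Int × Int × Int)) (p : Int × Int × Int × Int × Int) : Bool :=
  ! l.any (fun q => (!(q == p)) && pvLe q p)

-- the distinct minimal points of l, in first-occurrence order of l
def pvMinima (l : List (Int × Int × Int × Int × Int)) : List (Int × Int × Int × Int × Int) :=
  (PySem.List.dedup l).filter (pvMinIn l)

theorem pvLe_refl (p : Int × Int × Int × Int × Int) : pvLe p p = true := by
  simp [pvLe]

theorem pvLe_trans {a b c : Int × Int × Int × Int × Int}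
    (h1 : pvLe a b = true) (h2 : pvLe b c = true) : pvLe a c = true := by
  simp only [pvLe, Bool.and_eq_true, decide_eq_true_eq] at *
  omega

theorem pvLe_eq_of_sum_le {q p : Int × Int × Int × Int × Int} (h : pvLe q p = true)
    (hs : pvSum p ≤ pvSum q) : q = p := by
  simp only [pvLe, Bool.and_eq_true, decide_eq_true_eq] at h
  simp only [pvSum] at hs
  obtain ⟨a1, a2, a3, a4, a5⟩ := q
  obtain ⟨b1, b2, b3, b4, b5⟩ := p
  simp_all only [Prod.mk.injEq]
  omega

theorem pvKey_le_sum {a b : Int × Int × Int × Int × Int} (h : pvKey a ≤ pvKey b) :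
    pvSum a ≤ pvSum b := by
  simp only [pvKey] at h
  rcases le_iff_lt_or_eq.mp h with hlt | heq
  · exact List.head_le_of_lt hlt
  · exact le_of_eq (List.cons.inj heq).1

theorem pvKey_inj {a b : Int × Int × Int × Int × Int} (h : pvKey a = pvKey b) : a = b := by
  simp only [pvKey, List.cons.injEq] at h
  obtain ⟨a1, a2, a3, a4, a5⟩ := a
  obtain ⟨b1, b2, b3, b4, b5⟩ := b
  simp_all

-- an element sorted no later than c cannot be strictly dominated by c
theorem pvCancel {p c : Int × Int × Int × Int × Int} (hk : pvKey p ≤ pvKey c)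
    (hle : pvLe c p = true) : p = c :=
  (pvLe_eq_of_sum_le hle (pvKey_le_sum hk)).symm

-- under increasing-key processing the removal branch never fires
theorem pvInnerA_eq (c : Int × Int × Int × Int × Int) (m : List (Int × Int × Int × Int × Int))
    (h : ∀ e ∈ m, pvLe c e = true → pvLe e c = true) :
    pvInnerA c m = if m.any (fun e => pvLe e c) then none else some m := by
  induction m with
  | nil => simp [pvInnerA]
  | cons e rest ih =>
    by_cases hec : pvLe e c = true
    · simp [pvInnerA, hec]
    · have hce : pvLe c e = false := by
        cases hq : pvLe c e
        · rfl
        · exact absurd (h e (by simp) hq) hec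
      have ih' := ih (fun x hx => h x (by simp [hx]))
      simp only [pvInnerA, hec, hce, if_false, Bool.false_eq_true, ih']
      by_cases hr : rest.any (fun e => pvLe e c) = true <;> simp [hr, hec]

theorem pvDedup_append (l : List (Int × Int × Int × Int × Int)) (c : Int × Int × Int × Int × Int) :
    PySem.List.dedup (l ++ [c]) =
      if c ∈ l then PySem.List.dedup l else PySem.List.dedup l ++ [c] := by
  simp only [PySem.List.dedup_eq_ofList, PySem.Set.ofList_eq_foldl, List.foldl_append, List.foldl]
  rw [← PySem.Set.ofList_eq_foldl]
  simp [PySem.Set.add, PySem.Set.contains, PySem.Set.mem_ofList]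

theorem pvDedup_sublist (l : List (Int × Int × Int × Int × Int)) :
    List.Sublist (PySem.List.dedup l) l := by
  induction l using List.reverseRecOn with
  | nil => exact List.Sublist.refl _
  | append_singleton init c ih =>
    rw [pvDedup_append]
    split_ifs with h
    · exact ih.trans (List.sublist_append_left init [c])
    · exact List.Sublist.append ih (List.Sublist.refl [c])

-- filtering by minimality in l++[c] agrees with minimality in l on the points of l
theorem pvMinIn_append {l : List (Int × Int × Int × Int × Int)}
    {c : Int × Int × Int × Int × Int} (hk : ∀ e ∈ l, pvKey e ≤ pvKey c)
    {p : Int × Int × Int × Int × Int} (hp : p ∈ l) :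
    pvMinIn (l ++ [c]) p = pvMinIn l p := by
  have hcp : ((!(c == p)) && pvLe c p) = false := by
    cases hle : pvLe c p
    · simp
    · have : p = c := pvCancel (hk p hp) hle
      simp [this]
  simp [pvMinIn, List.any_append, hcp]

-- A's fold over the sorted list computes exactly the distinct minimal points, and every
-- processed point is dominated by some member of the result
theorem pvMain (S : List (Int × Int × Int × Int × Int))
    (hS : S.Pairwise (fun a b => pvKey a ≤ pvKey b)) :
    S.foldl pvStepA [] = pvMinima S ∧
      ∀ q ∈ S, ∃ m ∈ pvMinima S, pvLe m q = true := by
  induction S using List.reverseRecOn with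
  | nil => exact ⟨rfl, by simp⟩
  | append_singleton init c ih =>
    rw [List.pairwise_append] at hS
    obtain ⟨hinit, -, hcross⟩ := hS
    have hk : ∀ e ∈ init, pvKey e ≤ pvKey c := fun e he => hcross e he c (by simp)
    obtain ⟨hfold, hcover⟩ := ih hinit
    have hMsub : ∀ e ∈ pvMinima init, e ∈ init := by
      intro e he
      simp only [pvMinima, List.mem_filter, PySem.List.mem_dedup] at he
      exact he.1
    have hinner := pvInnerA_eq c (pvMinima init) (fun e he hce => by
      rw [pvCancel (hk e (hMsub e he)) hce]; exact pvLe_refl c)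
    rw [List.foldl_append, List.foldl_cons, List.foldl_nil, hfold]
    by_cases hdom : (pvMinima init).any (fun e => pvLe e c) = true
    · -- c is dominated by some kept minimum: minima unchanged
      have hstep : pvStepA (pvMinima init) c = pvMinima init := by
        simp [pvStepA, hinner, hdom]
      obtain ⟨e, heM, hec⟩ := List.any_eq_true.mp hdom
      have hEq : pvMinima (init ++ [c]) = pvMinima init := by
        by_cases hcin : c ∈ init
        · simp only [pvMinima, pvDedup_append, hcin, if_true]
          exact List.filter_congr fun p hp => pvMinIn_append hk ((PySem.List.mem_dedup _ _).mp hp)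
        · simp only [pvMinima, pvDedup_append, hcin, if_false, List.filter_append]
          have hcf : pvMinIn (init ++ [c]) c = false := by
            have hec' : e ≠ c := fun h => hcin (h ▸ hMsub e heM)
            simp only [pvMinIn, Bool.not_eq_false']
            exact List.any_eq_true.mpr ⟨e, by simp [hMsub e heM], by simp [hec', hec]⟩
          rw [List.filter_congr fun p hp => pvMinIn_append hk ((PySem.List.mem_dedup _ _).mp hp)]
          simp [hcf]
      refine ⟨hstep.trans hEq.symm, ?_⟩
      intro q hq
      rcases List.mem_append.mp hq with hq | hq
      · obtain ⟨m, hm, hle⟩ := hcover q hq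
        exact ⟨m, hEq ▸ hm, hle⟩
      · have hqc : q = c := by simpa using hq
        exact ⟨e, hEq ▸ heM, hqc ▸ hec⟩
    · -- c is a new minimum: appended, nothing removed
      have hstep : pvStepA (pvMinima init) c = pvMinima init ++ [c] := by
        simp [pvStepA, hinner, hdom]
      have hcin : c ∉ init := by
        intro hc
        obtain ⟨m, hm, hmc⟩ := hcover c hc
        exact hdom (List.any_eq_true.mpr ⟨m, hm, hmc⟩)
      have hcmin : pvMinIn (init ++ [c]) c = true := by
        simp only [pvMinIn, Bool.not_eq_true']
        rw [List.any_eq_false]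
        intro q hq
        rcases List.mem_append.mp hq with hq | hq
        · by_cases hqc : pvLe q c = true
          · obtain ⟨m, hm, hmq⟩ := hcover q hq
            have hmc : pvLe m c = true := pvLe_trans hmq hqc
            exact absurd (List.any_eq_true.mpr ⟨m, hm, hmc⟩) hdom
          · simp [hqc]
        · have : q = c := by simpa using hq
          simp [this]
      have hEq : pvMinima (init ++ [c]) = pvMinima init ++ [c] := by
        simp only [pvMinima, pvDedup_append, hcin, if_false, List.filter_append]
        rw [List.filter_congr fun p hp => pvMinIn_append hk ((PySem.List.mem_dedup _ _).mp hp)]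
        simp [hcmin]
      refine ⟨hstep.trans hEq.symm, ?_⟩
      intro q hq
      rcases List.mem_append.mp hq with hq | hq
      · obtain ⟨m, hm, hle⟩ := hcover q hq
        exact ⟨m, hEq ▸ List.mem_append_left [c] hm, hle⟩
      · simp at hq
        exact ⟨c, hEq ▸ List.mem_append_right _ (by simp), hq ▸ pvLe_refl c⟩

-- ===== VERDICT (by name: the statement is the Claim_ definition above) =====
theorem pvKey_pairwise_lt (S : List (Int × Int × Int × Int × Int))
    (hpw : S.Pairwise (fun a b => pvKey a ≤ pvKey b)) (hnd : (PySem.List.dedup S).Nodup) :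
    (pvMinima S).Pairwise (fun a b => pvKey a < pvKey b) := by
  have hle : (PySem.List.dedup S).Pairwise (fun a b => pvKey a ≤ pvKey b) :=
    hpw.sublist (pvDedup_sublist S)
  have hlt : (PySem.List.dedup S).Pairwise (fun a b => pvKey a < pvKey b) := by
    have := hle.and hnd
    exact this.imp fun ⟨h1, h2⟩ => lt_of_le_of_ne h1 fun hk => h2 (pvKey_inj hk)
  exact hlt.filter _

theorem pareto_reduce_skill_requirements_py_spec : Claim_equal_pareto_reduce_skill_requirements_py := by
  intro candidates _
  unfold Spec_pareto_reduce_skill_requirements_py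
  unfold pareto_reduce_skill_requirements_py pareto_reduce_skill_requirements_py_alt
  by_cases hc : candidates = []
  · simp [hc]
  · simp only [hc, if_false]
    have hpw : (pvSorted candidates).Pairwise (fun a b => pvKey a ≤ pvKey b) :=
      PySem.List.sorted_pairwise candidates pvKey
    obtain ⟨hfold, -⟩ := pvMain (pvSorted candidates) hpw
    rw [hfold]
    have hperm : (pvMinima (pvSorted candidates)).Perm
        ((PySem.Set.ofList candidates).filter
          (fun p => ! (PySem.Set.ofList candidates).any (fun q => (!(q == p)) && pvLe q p))) := by
      refine (List.perm_ext_iff_of_nodup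
        ((PySem.List.nodup_dedup _).filter _) ((PySem.Set.nodup_ofList _).filter _)).mpr ?_
      intro a
      simp only [pvMinIn, List.mem_filter, PySem.List.mem_dedup,
        PySem.Set.mem_ofList, pvSorted, PySem.List.mem_sorted, Bool.not_eq_true',
        List.any_eq_false]
    exact (PySem.List.sorted_eq_of_perm_of_pairwise_lt _ _ pvKey hperm
      (pvKey_pairwise_lt _ hpw (PySem.List.nodup_dedup _))).symm
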